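-- pv_equiv track=rewrite | github.com/JiyooonPark/Algorithm | ThisIsTheRealCodingTest/Part2/chapter4/LRUD.py | solution_my
-- ===== SOURCE A (Python) =====
-- def solution_my(N, path):
--     pose = [1, 1]
--     for p in path:
--         if p == 'L' and pose[0] > 1:
--             pose = [pose[0] -1, pose[1]]
--         elif p == 'R' and pose[0] < N:
--             pose = [pose[0] + 1, pose[1]]
--         elif p == 'U' and pose[1] > 1:
--             pose = [pose[0], pose[1] -1]
--         elif p =='D' and pose[1] < N:
--             pose = [pose[0], pose[1]+ 1]
--         else:
--             continue
--     return pose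
-- ===== SOURCE B (Python) =====
-- def _axis(N, path, lo, hi):
--     # walk one axis: only lo/hi characters affect it; bounded step in [1, N]
--     pos = 1
--     for p in path:
--         if p == lo:
--             step = -1
--         elif p == hi:
--             step = 1
--         else:
--             continue
--         if 1 <= pos + step <= N:
--             pos += step
--     return pos
--
-- def solution_my(N, path):
--     return [_axis(N, path, 'L', 'R'), _axis(N, path, 'U', 'D')]
-- ===== Notes on version B (the rewrite author's own statement) =====
-- stated objective: alternative
-- what changed: Decomposes the 2-D simulation into two independent staged passes, one per axis: x is computed from only the 'L'/'R' commands and y from only the 'U'/'D' commands, each with a uniform bounded step, instead of A's single pass over a 2-D state with four per-direction branches; correct because each coordinate's evolution in A depends only on that coordinate and its two commands.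
import Mathlib
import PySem

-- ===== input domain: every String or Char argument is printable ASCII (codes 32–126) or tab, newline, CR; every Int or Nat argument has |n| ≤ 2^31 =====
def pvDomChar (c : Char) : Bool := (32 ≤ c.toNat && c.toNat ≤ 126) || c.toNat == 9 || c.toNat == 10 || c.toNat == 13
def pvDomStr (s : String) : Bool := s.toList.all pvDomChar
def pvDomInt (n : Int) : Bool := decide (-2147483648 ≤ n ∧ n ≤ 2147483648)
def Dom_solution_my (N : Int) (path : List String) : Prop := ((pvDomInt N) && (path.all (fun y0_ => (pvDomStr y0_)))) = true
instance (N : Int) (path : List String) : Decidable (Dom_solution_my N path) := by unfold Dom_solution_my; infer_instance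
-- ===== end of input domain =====

-- ===== PORT A =====
-- B recomputes the position per axis in two staged passes (x from 'L'/'R' only, y from 'U'/'D'
-- only) instead of A's single pass over a 2-D state (objective: alternative decomposition).
def solution_myStepA (N : Int) (pose : Int × Int) (p : String) : Int × Int :=
  if p = "L" ∧ pose.1 > 1 then (pose.1 - 1, pose.2)
  else if p = "R" ∧ pose.1 < N then (pose.1 + 1, pose.2)
  else if p = "U" ∧ pose.2 > 1 then (pose.1, pose.2 - 1)
  else if p = "D" ∧ pose.2 < N then (pose.1, pose.2 + 1)
  else pose

def solution_my (N : Int) (path : List String) : List Int :=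
  let pose := path.foldl (solution_myStepA N) (1, 1)
  [pose.1, pose.2]

-- ===== PORT B =====
-- one step of Source B's _axis loop: pick the step for lo/hi (continue otherwise), bounded move
def solution_myAxisStep (N : Int) (lo hi : String) (pos : Int) (p : String) : Int :=
  let step? : Option Int := if p = lo then some (-1) else if p = hi then some 1 else none
  match step? with
  | none => pos
  | some s => if 1 ≤ pos + s ∧ pos + s ≤ N then pos + s else pos

def solution_myAxis (N : Int) (path : List String) (lo hi : String) : Int :=
  path.foldl (solution_myAxisStep N lo hi) 1

def solution_my_alt (N : Int) (path : List String) : List Int :=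
  [solution_myAxis N path "L" "R", solution_myAxis N path "U" "D"]

-- ===== PRECONDITION & SPEC =====
def Spec_solution_my (N : Int) (path : List String) (out : List Int) : Prop := out = solution_my_alt N path
instance (N : Int) (path : List String) (out : List Int) : Decidable (Spec_solution_my N path out) := by unfold Spec_solution_my; infer_instance

-- ===== CLAIM (what is proved, stated in full; the proofs are below) =====
def Claim_equal_solution_my : Prop := ∀ (N : Int) (path : List String), Dom_solution_my N path → Spec_solution_my N path (solution_my N path)

-- ===== LEMMAS AND PROOFS =====
-- loop invariant (per coordinate): ≥ 1, and ≤ N unless it stands at 1 with N < 1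
def solution_myInvC (N c : Int) : Prop := 1 ≤ c ∧ (c ≤ N ∨ c = 1)

theorem solution_my_step_eq (N : Int) (xy : Int × Int) (p : String)
    (hx : solution_myInvC N xy.1) (hy : solution_myInvC N xy.2) :
    solution_myStepA N xy p
      = (solution_myAxisStep N "L" "R" xy.1 p, solution_myAxisStep N "U" "D" xy.2 p) ∧
    solution_myInvC N (solution_myStepA N xy p).1 ∧
    solution_myInvC N (solution_myStepA N xy p).2 := by
  obtain ⟨x, y⟩ := xy
  obtain ⟨h1, h2⟩ := hx
  obtain ⟨h3, h4⟩ := hy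
  by_cases hL : p = "L" <;> by_cases hR : p = "R" <;> by_cases hU : p = "U" <;>
    by_cases hD : p = "D" <;>
    simp_all [solution_myStepA, solution_myAxisStep, solution_myInvC] <;>
    split_ifs <;> simp_all <;> omega

theorem solution_my_fold_eq (N : Int) (path : List String) (x y : Int)
    (hx : solution_myInvC N x) (hy : solution_myInvC N y) :
    path.foldl (solution_myStepA N) (x, y)
      = (path.foldl (solution_myAxisStep N "L" "R") x,
         path.foldl (solution_myAxisStep N "U" "D") y) := by
  induction path generalizing x y with
  | nil => rfl
  | cons p ps ih =>
    obtain ⟨heq, hx', hy'⟩ := solution_my_step_eq N (x, y) p hx hy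
    simp only [List.foldl_cons]
    rw [heq] at hx' hy' ⊢
    exact ih _ _ hx' hy'

-- ===== VERDICT (by name: the statement is the Claim_ definition above) =====
theorem solution_my_spec : Claim_equal_solution_my := by
  intro N path _
  unfold Spec_solution_my solution_my solution_my_alt solution_myAxis
  rw [solution_my_fold_eq N path 1 1 ⟨le_refl 1, Or.inr rfl⟩ ⟨le_refl 1, Or.inr rfl⟩]
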